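-- pv_equiv track=rewrite | github.com/wuxiyang1996/SABER | scripts/compute_libero_metrics_by_category.py | prefer_eval_result_replay
-- ===== SOURCE A (Python) =====
-- def prefer_eval_result_replay(results: list[dict]) -> list[dict]:
--     """When multiple results exist for the same (victim_model, objective), prefer the one from eval_result/replay_*.json."""
--     key_to_result: dict[tuple[str, str], dict] = {}
--     for r in results:
--         key = (r["victim_model"], r["objective"])
--         src = r.get("source_path", "")
--         is_eval_replay = "eval_result" in src and "replay_" in src
--         existing = key_to_result.get(key)
--         if existing is None:
--             key_to_result[key] = r
--         elif is_eval_replay: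
--             # Prefer this eval_result replay over existing (e.g. from agent_output_records)
--             key_to_result[key] = r
--         # else keep existing
--     return list(key_to_result.values())
-- ===== SOURCE B (Python) =====
-- def prefer_eval_result_replay(results: list[dict]) -> list[dict]:
--     """Group results by (victim_model, objective) in first-appearance order,
--     then pick, per group, the last eval_result/replay_* entry, else the first entry."""
--     key_to_list: dict[tuple[str, str], list[dict]] = {}
--     for r in results:
--         key_to_list.setdefault((r["victim_model"], r["objective"]), []).append(r)
--     out = []
--     for grp in key_to_list.values():
--         chosen = next(
--             (r for r in reversed(grp)
--              if "eval_result" in r.get("source_path", "") and "replay_" in r.get("source_path", "")),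
--             grp[0],
--         )
--         out.append(chosen)
--     return out
-- ===== Notes on version B (the rewrite author's own statement) =====
-- stated objective: alternative
-- what changed: Replaces the inline overwrite-on-match dict update with a two-pass decomposition: first group all results per (victim_model, objective) key in first-appearance order, then select per group the last eval_result/replay entry (scanning the group in reverse) or else the group's first entry.
import Mathlib
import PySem

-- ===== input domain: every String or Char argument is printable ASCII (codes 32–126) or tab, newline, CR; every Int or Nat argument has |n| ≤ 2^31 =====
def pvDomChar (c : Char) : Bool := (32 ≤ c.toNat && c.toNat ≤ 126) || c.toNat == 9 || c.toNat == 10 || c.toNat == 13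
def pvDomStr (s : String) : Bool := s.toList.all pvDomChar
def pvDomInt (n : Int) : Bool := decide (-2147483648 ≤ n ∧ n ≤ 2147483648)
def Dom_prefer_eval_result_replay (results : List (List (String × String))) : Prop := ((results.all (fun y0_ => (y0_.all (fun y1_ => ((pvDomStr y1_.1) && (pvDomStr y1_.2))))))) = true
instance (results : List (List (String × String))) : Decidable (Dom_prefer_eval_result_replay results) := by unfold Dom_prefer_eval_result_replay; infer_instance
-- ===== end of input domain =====

-- B regroups the results per key first and then selects per group (last eval_result/replay entry,
-- else the group's first); proved to return exactly A's value on every input where A does not raise.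

-- shared helpers: both Python versions contain these very expressions
-- r[k]; Pre_ excludes the KeyError case, so the "" default is never claimed about
def pvGetStr (r : List (String × String)) (k : String) : String :=
  ((PySem.Dict.mk r).get? k).getD ""

def pvKey (r : List (String × String)) : String × String :=
  (pvGetStr r "victim_model", pvGetStr r "objective")

-- '"eval_result" in src and "replay_" in src' with src = r.get("source_path", "")
def pvIsER (r : List (String × String)) : Bool :=
  PySem.Str.isIn "eval_result" ((PySem.Dict.mk r).getD "source_path" "") &&
  PySem.Str.isIn "replay_" ((PySem.Dict.mk r).getD "source_path" "")

-- ===== PORT A =====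
def pvStepA (d : PySem.Dict (String × String) (List (String × String)))
    (r : List (String × String)) : PySem.Dict (String × String) (List (String × String)) :=
  match d.get? (pvKey r) with
  | none => d.insert (pvKey r) r
  | some _ => if pvIsER r then d.insert (pvKey r) r else d

def prefer_eval_result_replay (results : List (List (String × String))) : List (List (String × String)) :=
  (results.foldl pvStepA PySem.Dict.empty).values

-- ===== PORT B =====
def pvStepB (g : PySem.Dict (String × String) (List (List (String × String))))
    (r : List (String × String)) : PySem.Dict (String × String) (List (List (String × String))) :=
  g.modify (pvKey r) [] (· ++ [r])

-- next((r for r in reversed(grp) if …), grp[0]); groups are never empty, so headD's default never shows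
def pvSelect (grp : List (List (String × String))) : List (String × String) :=
  (grp.reverse.find? pvIsER).getD (grp.headD [])

def prefer_eval_result_replay_alt (results : List (List (String × String))) : List (List (String × String)) :=
  ((results.foldl pvStepB PySem.Dict.empty).values).map pvSelect

-- ===== PRECONDITION & SPEC =====
-- Pre_ excludes exactly the dicts missing "victim_model" or "objective", where Python A raises KeyError
def Pre_prefer_eval_result_replay (results : List (List (String × String))) : Prop :=
  ∀ r ∈ results, (PySem.Dict.mk r).contains "victim_model" = true ∧ (PySem.Dict.mk r).contains "objective" = true
instance (results : List (List (String × String))) : Decidable (Pre_prefer_eval_result_replay results) := by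
  unfold Pre_prefer_eval_result_replay; infer_instance

def pvWitness_prefer_eval_result_replay : (List (List (String × String))) :=
  [[("victim_model", "m"), ("objective", "o"), ("source_path", "eval_result/replay_1.json")],
   [("victim_model", "m"), ("objective", "o")]]

def Spec_prefer_eval_result_replay (results : List (List (String × String))) (out : List (List (String × String))) : Prop := out = prefer_eval_result_replay_alt results
instance (results : List (List (String × String))) (out : List (List (String × String))) : Decidable (Spec_prefer_eval_result_replay results out) := by unfold Spec_prefer_eval_result_replay; infer_instance

-- ===== CLAIM (what is proved, stated in full; the proofs are below) =====
def Claim_equal_prefer_eval_result_replay : Prop := ∀ (results : List (List (String × String))), Dom_prefer_eval_result_replay results → Pre_prefer_eval_result_replay results → Spec_prefer_eval_result_replay results (prefer_eval_result_replay results)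

-- ===== LEMMAS AND PROOFS =====

-- A's per-key accumulator: last eval_replay wins, else keep cur
def pvSelA (cur : List (String × String)) (l : List (List (String × String))) : List (String × String) :=
  l.foldl (fun cur r => if pvIsER r then r else cur) cur

theorem pvSelA_eq (l : List (List (String × String))) (cur : List (String × String)) :
    pvSelA cur l = (l.reverse.find? pvIsER).getD cur := by
  induction l generalizing cur with
  | nil => simp [pvSelA]
  | cons x t ih =>
    simp only [pvSelA, List.foldl_cons, List.reverse_cons, List.find?_append]
    rw [show (t.foldl (fun cur r => if pvIsER r then r else cur) (if pvIsER x then x else cur)) =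
        pvSelA (if pvIsER x then x else cur) t from rfl, ih]
    cases h : t.reverse.find? pvIsER with
    | some a => simp [Option.or]
    | none => by_cases hx : pvIsER x <;> simp [hx, Option.or, List.find?]

theorem pvSelect_cons (r : List (String × String)) (t : List (List (String × String))) :
    pvSelect (r :: t) = pvSelA r t := by
  rw [pvSelA_eq]
  simp only [pvSelect, List.reverse_cons, List.find?_append, List.headD_cons]
  cases h : t.reverse.find? pvIsER with
  | some a => simp [Option.or]
  | none => by_cases hr : pvIsER r <;> simp [hr, Option.or, List.find?]

theorem pvKeysA (results : List (List (String × String)))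
    (d : PySem.Dict (String × String) (List (String × String))) :
    (results.foldl pvStepA d).keys = PySem.Set.update d.keys (results.map pvKey) := by
  induction results generalizing d with
  | nil => simp [PySem.Set.update]
  | cons r t ih =>
    simp only [List.foldl_cons, List.map_cons, ih]
    have hupd : PySem.Set.update d.keys (pvKey r :: t.map pvKey)
        = PySem.Set.update (PySem.Set.add d.keys (pvKey r)) (t.map pvKey) := rfl
    rw [hupd]
    congr 1
    cases h : d.get? (pvKey r) with
    | none =>
      have hc : d.contains (pvKey r) = false := by
        rw [PySem.Dict.contains_eq_isSome_get?, h]; rfl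
      have hnm : pvKey r ∉ d.keys := by
        intro hm
        rw [(PySem.Dict.contains_iff_mem_keys d (pvKey r)).mpr hm] at hc
        exact absurd hc (by decide)
      simp only [pvStepA, h]
      rw [PySem.Dict.keys_insert_of_not_contains d r hc]
      simp [PySem.Set.add, hnm]
    | some v =>
      have hc : d.contains (pvKey r) = true := by
        rw [PySem.Dict.contains_eq_isSome_get?, h]; rfl
      have hmem : pvKey r ∈ d.keys := (PySem.Dict.contains_iff_mem_keys d (pvKey r)).mp hc
      have hk : PySem.Set.add d.keys (pvKey r) = d.keys := by
        simp [PySem.Set.add, hmem]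
      rw [hk]
      simp only [pvStepA, h]
      split
      · exact PySem.Dict.keys_insert_of_contains d r hc
      · rfl

theorem pvGetA (results : List (List (String × String)))
    (d : PySem.Dict (String × String) (List (String × String))) (k : String × String) :
    (results.foldl pvStepA d).get? k =
      match d.get? k with
      | some v => some (pvSelA v (results.filter (fun r => pvKey r == k)))
      | none =>
        match results.filter (fun r => pvKey r == k) with
        | [] => none
        | r :: t => some (pvSelA r t) := by
  induction results generalizing d with
  | nil => cases h : d.get? k <;> simp [h, pvSelA]
  | cons x t ih =>
    simp only [List.foldl_cons, List.filter_cons, ih]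
    by_cases hk : pvKey x = k
    · subst hk
      simp only [beq_self_eq_true, if_true]
      cases h : d.get? (pvKey x) with
      | none =>
        have step : pvStepA d x = d.insert (pvKey x) x := by simp [pvStepA, h]
        rw [step, PySem.Dict.get?_insert_self]
      | some v =>
        by_cases hER : pvIsER x = true
        · have step : pvStepA d x = d.insert (pvKey x) x := by simp [pvStepA, h, hER]
          rw [step, PySem.Dict.get?_insert_self]
          simp [pvSelA, hER]
        · have step : pvStepA d x = d := by simp [pvStepA, h, hER]
          rw [step, h]
          simp [pvSelA, hER]
    · have hbe : (pvKey x == k) = false := by simp [hk]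
      have step : (pvStepA d x).get? k = d.get? k := by
        cases h : d.get? (pvKey x) with
        | none =>
          simp only [pvStepA, h]
          exact PySem.Dict.get?_insert_of_ne d x (fun he => hk he.symm)
        | some v =>
          simp only [pvStepA, h]
          split
          · exact PySem.Dict.get?_insert_of_ne d x (fun he => hk he.symm)
          · rfl
      rw [step]
      simp only [hbe, Bool.false_eq_true, if_false]

-- every result in both ports, as "select of the key's group" over the ordered key set
theorem pvA_char (results : List (List (String × String))) :
    prefer_eval_result_replay results =
      (PySem.Set.ofList (results.map pvKey)).map
        (fun k => pvSelect (results.filter (fun r => pvKey r == k))) := by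
  unfold prefer_eval_result_replay
  have hkeys : (results.foldl pvStepA PySem.Dict.empty).keys = PySem.Set.ofList (results.map pvKey) := by
    rw [pvKeysA]
    simp [PySem.Set.ofList_eq_foldl, PySem.Set.update, PySem.Dict.keys_empty]
  have hnd : (results.foldl pvStepA PySem.Dict.empty).keys.Nodup := by
    rw [hkeys]; exact PySem.Set.nodup_ofList _
  rw [PySem.Dict.values_eq_map_keys _ hnd []]
  rw [hkeys]
  apply List.map_congr_left
  intro k hkmem
  have hmem : k ∈ results.map pvKey := (PySem.Set.mem_ofList _ _).mp hkmem
  obtain ⟨r0, hr0, hkeq⟩ := List.mem_map.mp hmem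
  have hne : results.filter (fun r => pvKey r == k) ≠ [] := by
    intro hnil
    have : r0 ∈ results.filter (fun r => pvKey r == k) :=
      List.mem_filter.mpr ⟨hr0, by simp [hkeq]⟩
    simp [hnil] at this
  cases hf : results.filter (fun r => pvKey r == k) with
  | nil => exact absurd hf hne
  | cons r t =>
    have := pvGetA results PySem.Dict.empty k
    rw [PySem.Dict.get?_empty, hf] at this
    rw [PySem.Dict.getD_eq_get?_getD, this, pvSelect_cons]
    rfl

theorem pvB_char (results : List (List (String × String))) :
    prefer_eval_result_replay_alt results =
      (PySem.Set.ofList (results.map pvKey)).map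
        (fun k => pvSelect (results.filter (fun r => pvKey r == k))) := by
  unfold prefer_eval_result_replay_alt
  have hkeys : (results.foldl pvStepB PySem.Dict.empty).keys = PySem.Set.ofList (results.map pvKey) := by
    have h1 := PySem.Dict.keys_foldl_modify_key results pvKey ([] : List (List (String × String)))
      (fun _ r => (· ++ [r])) PySem.Dict.empty
    simp only [PySem.Dict.keys_empty] at h1
    exact h1.trans (by rw [PySem.Set.ofList_eq_foldl]; rfl)
  have hnd : (results.foldl pvStepB PySem.Dict.empty).keys.Nodup := by
    rw [hkeys]; exact PySem.Set.nodup_ofList _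
  have hgd : ∀ k, (results.foldl pvStepB PySem.Dict.empty).getD k [] =
      results.filter (fun r => pvKey r == k) := by
    intro k
    have h2 := PySem.Dict.getD_foldl_modify_append (results.map (fun r => (pvKey r, r)))
      PySem.Dict.empty k
    rw [List.foldl_map] at h2
    simp only [PySem.Dict.getD_empty, List.nil_append, List.filter_map, List.map_map] at h2
    refine Eq.trans ?_ (h2.trans ?_)
    · rfl
    · simp [Function.comp_def]
  rw [PySem.Dict.values_eq_map_keys _ hnd [], hkeys, List.map_map]
  apply List.map_congr_left
  intro k hkmem
  simp only [Function.comp_apply]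
  rw [hgd k]

-- ===== VERDICT (by name: the statement is the Claim_ definition above) =====
theorem prefer_eval_result_replay_spec : Claim_equal_prefer_eval_result_replay := by
  intro results _ _
  unfold Spec_prefer_eval_result_replay
  rw [pvA_char, pvB_char]
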